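-- pv_equiv track=rewrite | github.com/Xinrihui/Beauty_of_data_structure_and_algrithms | Leetcode/Dynamic_Programming/879_Profitable_Schemes.py | solve_2D
-- ===== SOURCE A (Python) =====
-- def solve_2D(G: int, P: int, group, profit):
--     """
--     01 背包问题
--
--     2维动态规划
--     状态压缩
--
--     G=10^2
--     n=10^2
--
--     时间复杂度 O(Gn)=10^4
--
--     Wrong Answer !
--
--     :param s:
--     :return:
--
--     """
--
--     n = len(group)
--
--     group = [0] + group
--     profit = [0] + profit
--
--     dpV = [0 for __ in range(G + 1)] # 达到 某重量时 背包中物品的总价值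
--     dpNum = [0 for __ in range(G + 1)] # 达到 某重量时 的 物品的组合 数
--
--     dpV[0] = 0
--     dpNum[0]=1
--
--     Num=0
--
--     for i in range(1, n + 1):
--         for w in range(G, group[i] - 1, -1):
--
--             if dpV[w - group[i]] + profit[i]>=P:
--                 Num += dpNum[w - group[i]]
--
--             # if  dpV[w]>=P:
--             #     Num += dpNum[w]
--
--             dpV[w] = max(dpV[w - group[i]] + profit[i],dpV[w])
--             dpNum[w]+=dpNum[w - group[i]]
--
--
--     return Num % (10 ** 9 + 7)
-- ===== SOURCE B (Python) =====
-- def solve_2D(G: int, P: int, group, profit):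
--     # Forward 2D-style DP: build immutable (value, count) layers per item,
--     # then count profitable schemes in a separate pass over the stored pre-layers.
--     n = len(group)
--     V = [0] * (G + 1)
--     C = [1] + [0] * G
--     layers = []
--     for g, p in zip(group, profit):
--         layers.append((V, C))
--         V = [max(V[w], V[w - g] + p) if w >= g else V[w] for w in range(G + 1)]
--         C = [C[w] + C[w - g] if w >= g else C[w] for w in range(G + 1)]
--     num = 0
--     for (g, p), (V_, C_) in zip(zip(group, profit), layers):
--         num += sum(C_[w] if V_[w] + p >= P else 0 for w in range(G - g + 1))
--     return num % (10 ** 9 + 7)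
-- ===== Notes on version B (the rewrite author's own statement) =====
-- stated objective: alternative
-- what changed: Replaces A's in-place backward 1D rolling-array update (which interleaves counting with destructive writes) by an immutable forward 2D-style construction of per-item (value, count) layers followed by a separate counting pass over the stored pre-layers.
import Mathlib
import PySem

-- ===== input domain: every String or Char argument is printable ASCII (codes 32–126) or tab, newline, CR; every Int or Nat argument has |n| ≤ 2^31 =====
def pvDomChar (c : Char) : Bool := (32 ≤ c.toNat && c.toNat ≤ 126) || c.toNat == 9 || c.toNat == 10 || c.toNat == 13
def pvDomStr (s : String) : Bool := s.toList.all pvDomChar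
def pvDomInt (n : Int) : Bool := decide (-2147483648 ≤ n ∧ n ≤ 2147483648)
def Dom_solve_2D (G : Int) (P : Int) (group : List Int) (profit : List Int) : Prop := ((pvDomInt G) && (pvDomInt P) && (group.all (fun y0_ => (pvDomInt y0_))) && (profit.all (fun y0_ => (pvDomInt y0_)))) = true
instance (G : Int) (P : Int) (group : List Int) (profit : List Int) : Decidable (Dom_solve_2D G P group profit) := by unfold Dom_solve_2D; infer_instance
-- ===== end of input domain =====

-- B replaces A's in-place backward 1D knapsack update by an immutable forward layer
-- construction plus a separate counting pass over the stored pre-layers (objective: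
-- alternative decomposition, same asymptotic cost). A does not observably mutate its
-- arguments (it rebinds local padded copies), so full behavioural equality is claimed on Pre_.

-- ===== PORT A =====
-- Python inner-loop body; reads/writes use pyGetD/pySetD (all indices are in range under Pre_).
def innerStepA (P g p : Int) (st : List Int × List Int × Int) (w : Int) : List Int × List Int × Int :=
  let Num := if PySem.List.pyGetD st.1 (w - g) 0 + p ≥ P then st.2.2 + PySem.List.pyGetD st.2.1 (w - g) 0 else st.2.2
  (PySem.List.pySetD st.1 w (max (PySem.List.pyGetD st.1 (w - g) 0 + p) (PySem.List.pyGetD st.1 w 0)),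
   PySem.List.pySetD st.2.1 w (PySem.List.pyGetD st.2.1 w 0 + PySem.List.pyGetD st.2.1 (w - g) 0),
   Num)

def solve_2D (G : Int) (P : Int) (group : List Int) (profit : List Int) : Int :=
  let n : Int := group.length
  let group' : List Int := 0 :: group
  let profit' : List Int := 0 :: profit
  let dpV := PySem.List.pySetD ((PySem.List.pyRange 0 (G+1) 1).map (fun _ => (0:Int))) 0 0
  let dpNum := PySem.List.pySetD ((PySem.List.pyRange 0 (G+1) 1).map (fun _ => (0:Int))) 0 1
  let st := (PySem.List.pyRange 1 (n+1) 1).foldl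
    (fun st i =>
      (PySem.List.pyRange G (PySem.List.pyGetD group' i 0 - 1) (-1)).foldl
        (innerStepA P (PySem.List.pyGetD group' i 0) (PySem.List.pyGetD profit' i 0)) st)
    (dpV, dpNum, (0:Int))
  st.2.2 % (10 ^ 9 + 7)

-- ===== PORT B =====
-- '[max(V[w], V[w-g]+p) if w >= g else V[w] for w in range(G+1)]'
def nextLayerV (G g p : Int) (V : List Int) : List Int :=
  (PySem.List.pyRange 0 (G+1) 1).map
    (fun w => if w ≥ g then max (PySem.List.pyGetD V w 0) (PySem.List.pyGetD V (w-g) 0 + p) else PySem.List.pyGetD V w 0)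

-- '[C[w] + C[w-g] if w >= g else C[w] for w in range(G+1)]'
def nextLayerC (G g : Int) (C : List Int) : List Int :=
  (PySem.List.pyRange 0 (G+1) 1).map
    (fun w => if w ≥ g then PySem.List.pyGetD C w 0 + PySem.List.pyGetD C (w-g) 0 else PySem.List.pyGetD C w 0)

-- 'sum(C_[w] if V_[w] + p >= P else 0 for w in range(G - g + 1))'
def cntB (G P g p : Int) (V C : List Int) : Int :=
  ((PySem.List.pyRange 0 (G - g + 1) 1).map
    (fun w => if PySem.List.pyGetD V w 0 + p ≥ P then PySem.List.pyGetD C w 0 else 0)).sum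

def solve_2D_alt (G : Int) (P : Int) (group : List Int) (profit : List Int) : Int :=
  let V0 : List Int := (PySem.List.pyRange 0 (G+1) 1).map (fun _ => 0)
  let C0 : List Int := 1 :: (PySem.List.pyRange 0 G 1).map (fun _ => 0)
  let build := (group.zip profit).foldl
    (fun (st : List (List Int × List Int) × List Int × List Int) gp =>
      (st.1 ++ [(st.2.1, st.2.2)], nextLayerV G gp.1 gp.2 st.2.1, nextLayerC G gp.1 st.2.2))
    ([], V0, C0)
  let num := ((group.zip profit).zip build.1).foldl
    (fun acc x => acc + cntB G P x.1.1 x.1.2 x.2.1 x.2.2) 0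
  num % (10 ^ 9 + 7)

-- ===== PRECONDITION & SPEC =====
-- Exactly the inputs on which Python A returns: a negative G or a negative group weight
-- raises IndexError, and a group index with no matching profit entry raises IndexError
-- unless that weight exceeds G (then A's inner loop is empty and never reads profit).
def Pre_solve_2D (G : Int) (P : Int) (group : List Int) (profit : List Int) : Prop :=
  0 ≤ G ∧ ∀ j : Nat, j < group.length → 0 ≤ group.getD j 0 ∧ (group.getD j 0 ≤ G → j < profit.length)
instance (G : Int) (P : Int) (group : List Int) (profit : List Int) : Decidable (Pre_solve_2D G P group profit) := by unfold Pre_solve_2D; infer_instance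

def pvWitness_solve_2D : Int × Int × List Int × List Int := (5, 3, [2, 2], [2, 3])

def Spec_solve_2D (G : Int) (P : Int) (group : List Int) (profit : List Int) (out : Int) : Prop := out = solve_2D_alt G P group profit
instance (G : Int) (P : Int) (group : List Int) (profit : List Int) (out : Int) : Decidable (Spec_solve_2D G P group profit out) := by unfold Spec_solve_2D; infer_instance

-- ===== CLAIM (what is proved, stated in full; the proofs are below) =====
def Claim_equal_solve_2D : Prop := ∀ (G : Int) (P : Int) (group : List Int) (profit : List Int), Dom_solve_2D G P group profit → Pre_solve_2D G P group profit → Spec_solve_2D G P group profit (solve_2D G P group profit)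

-- ===== LEMMAS AND PROOFS =====

-- the mixed arrays during A's backward sweep: entries above t already updated, the rest old
def mixV (G t g p : Int) (V : List Int) : List Int :=
  (PySem.List.pyRange 0 (G+1) 1).map
    (fun w => if t < w then max (PySem.List.pyGetD V (w-g) 0 + p) (PySem.List.pyGetD V w 0) else PySem.List.pyGetD V w 0)

def mixC (G t g : Int) (C : List Int) : List Int :=
  (PySem.List.pyRange 0 (G+1) 1).map
    (fun w => if t < w then PySem.List.pyGetD C w 0 + PySem.List.pyGetD C (w-g) 0 else PySem.List.pyGetD C w 0)

def partialCnt (P g p t : Int) (V C : List Int) : Int :=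
  ((PySem.List.pyRange 0 (t - g + 1) 1).map
    (fun w => if PySem.List.pyGetD V w 0 + p ≥ P then PySem.List.pyGetD C w 0 else 0)).sum

def itemStep (G P : Int) (st : List Int × List Int × Int) (gp : Int × Int) : List Int × List Int × Int :=
  (PySem.List.pyRange G (gp.1 - 1) (-1)).foldl (innerStepA P gp.1 gp.2) st

def countAll (G P : Int) : List (Int × Int) → List Int → List Int → Int
  | [], _, _ => 0
  | gp :: r, V, C => cntB G P gp.1 gp.2 V C + countAll G P r (nextLayerV G gp.1 gp.2 V) (nextLayerC G gp.1 C)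

def preLayers (G : Int) : List (Int × Int) → List Int → List Int → List (List Int × List Int)
  | [], _, _ => []
  | gp :: r, V, C => (V, C) :: preLayers G r (nextLayerV G gp.1 gp.2 V) (nextLayerC G gp.1 C)

lemma countAll_cons (G P : Int) (gp : Int × Int) (r : List (Int × Int)) (V C : List Int) :
    countAll G P (gp :: r) V C
      = cntB G P gp.1 gp.2 V C + countAll G P r (nextLayerV G gp.1 gp.2 V) (nextLayerC G gp.1 C) := rfl

lemma preLayers_cons (G : Int) (gp : Int × Int) (r : List (Int × Int)) (V C : List Int) :
    preLayers G (gp :: r) V C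
      = (V, C) :: preLayers G r (nextLayerV G gp.1 gp.2 V) (nextLayerC G gp.1 C) := rfl

lemma set_map_pyRange (G t v : Int) (f : Int → Int) (h0 : 0 ≤ t) (h1 : t < G + 1) :
    ((PySem.List.pyRange 0 (G+1) 1).map f).set t.toNat v
      = (PySem.List.pyRange 0 (G+1) 1).map (fun w => if w = t then v else f w) := by
  apply List.ext_getElem
  · simp
  · intro i hi1 hi2
    simp only [List.getElem_set, List.getElem_map, PySem.List.getElem_pyRange_one]
    by_cases h : t.toNat = i
    · have h2 : (0:Int) + (i:Int) = t := by omega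
      simp [h, h2]
    · have h2 : ¬ ((0:Int) + (i:Int) = t) := by omega
      have h3 : ¬ ((i:Int) = t) := by omega
      simp [h, h2, h3]

lemma mixV_top (G g p : Int) (V : List Int) (hV : (V.length : Int) = G + 1) :
    mixV G G g p V = V := by
  unfold mixV
  rw [List.map_congr_left (g := fun w => PySem.List.pyGetD V w 0)]
  · rw [← hV]; exact PySem.List.map_pyGetD_pyRange_zero' V 0
  · intro w hw
    rw [PySem.List.mem_pyRange_one] at hw
    simp only [if_neg (by omega : ¬ G < w)]

lemma mixC_top (G g : Int) (C : List Int) (hC : (C.length : Int) = G + 1) :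
    mixC G G g C = C := by
  unfold mixC
  rw [List.map_congr_left (g := fun w => PySem.List.pyGetD C w 0)]
  · rw [← hC]; exact PySem.List.map_pyGetD_pyRange_zero' C 0
  · intro w hw
    rw [PySem.List.mem_pyRange_one] at hw
    simp only [if_neg (by omega : ¬ G < w)]

lemma mixV_bot (G g p : Int) (V : List Int) :
    mixV G (g-1) g p V = nextLayerV G g p V := by
  unfold mixV nextLayerV
  apply List.map_congr_left
  intro w hw
  by_cases h : g ≤ w
  · rw [if_pos (by omega : g - 1 < w), if_pos h, max_comm]
  · rw [if_neg (by omega : ¬ g - 1 < w), if_neg h]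

lemma mixC_bot (G g : Int) (C : List Int) :
    mixC G (g-1) g C = nextLayerC G g C := by
  unfold mixC nextLayerC
  apply List.map_congr_left
  intro w hw
  by_cases h : g ≤ w
  · rw [if_pos (by omega : g - 1 < w), if_pos h]
  · rw [if_neg (by omega : ¬ g - 1 < w), if_neg h]

lemma inner_go (G P g p : Int) (V C : List Int) (hG : 0 ≤ G) (hg : 0 ≤ g) :
    ∀ (k : Nat) (t Num : Int), t = g - 1 + k → t ≤ G →
    (PySem.List.pyRange t (g-1) (-1)).foldl (innerStepA P g p) (mixV G t g p V, mixC G t g C, Num)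
      = (mixV G (g-1) g p V, mixC G (g-1) g C, Num + partialCnt P g p t V C) := by
  intro k
  induction k with
  | zero =>
    intro t Num ht htG
    have ht' : t = g - 1 := by omega
    subst ht'
    rw [PySem.List.pyRange_neg_one_eq_nil (by omega)]
    simp only [List.foldl_nil]
    have : partialCnt P g p (g-1) V C = 0 := by
      unfold partialCnt
      rw [PySem.List.pyRange_one_eq_nil (by omega)]
      simp
    rw [this]; ring_nf
  | succ m ih =>
    intro t Num ht htG
    have hgt : g - 1 < t := by omega
    have htg : g ≤ t := by omega
    rw [PySem.List.pyRange_neg_one_cons hgt]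
    simp only [List.foldl_cons]
    -- evaluate one step of innerStepA on the mixed state
    have hrV1 : PySem.List.pyGetD (mixV G t g p V) (t - g) 0 = PySem.List.pyGetD V (t - g) 0 := by
      unfold mixV
      rw [PySem.List.pyGetD_map_pyRange_of_nonneg _ _ _ _ (by omega) (by omega)]
      simp only [if_neg (by omega : ¬ t < t - g)]
    have hrV2 : PySem.List.pyGetD (mixV G t g p V) t 0 = PySem.List.pyGetD V t 0 := by
      unfold mixV
      rw [PySem.List.pyGetD_map_pyRange_of_nonneg _ _ _ _ (by omega) (by omega)]
      simp only [if_neg (by omega : ¬ t < t)]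
    have hrC1 : PySem.List.pyGetD (mixC G t g C) (t - g) 0 = PySem.List.pyGetD C (t - g) 0 := by
      unfold mixC
      rw [PySem.List.pyGetD_map_pyRange_of_nonneg _ _ _ _ (by omega) (by omega)]
      simp only [if_neg (by omega : ¬ t < t - g)]
    have hrC2 : PySem.List.pyGetD (mixC G t g C) t 0 = PySem.List.pyGetD C t 0 := by
      unfold mixC
      rw [PySem.List.pyGetD_map_pyRange_of_nonneg _ _ _ _ (by omega) (by omega)]
      simp only [if_neg (by omega : ¬ t < t)]
    have hwV : PySem.List.pySetD (mixV G t g p V) t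
        (max (PySem.List.pyGetD V (t - g) 0 + p) (PySem.List.pyGetD V t 0)) = mixV G (t-1) g p V := by
      rw [PySem.List.pySetD_of_nonneg _ _ (by omega : (0:Int) ≤ t)]
      unfold mixV
      rw [set_map_pyRange G t _ _ (by omega) (by omega)]
      apply List.map_congr_left
      intro w hw
      rw [PySem.List.mem_pyRange_one] at hw
      by_cases hwt : w = t
      · subst hwt
        rw [if_pos rfl, if_pos (by omega : w - 1 < w)]
      · rw [if_neg hwt]
        by_cases h2 : t - 1 < w
        · rw [if_pos (by omega : t < w), if_pos h2]
        · rw [if_neg (by omega : ¬ t < w), if_neg h2]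
    have hwC : PySem.List.pySetD (mixC G t g C) t
        (PySem.List.pyGetD C t 0 + PySem.List.pyGetD C (t - g) 0) = mixC G (t-1) g C := by
      rw [PySem.List.pySetD_of_nonneg _ _ (by omega : (0:Int) ≤ t)]
      unfold mixC
      rw [set_map_pyRange G t _ _ (by omega) (by omega)]
      apply List.map_congr_left
      intro w hw
      rw [PySem.List.mem_pyRange_one] at hw
      by_cases hwt : w = t
      · subst hwt
        rw [if_pos rfl, if_pos (by omega : w - 1 < w)]
      · rw [if_neg hwt]
        by_cases h2 : t - 1 < w
        · rw [if_pos (by omega : t < w), if_pos h2]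
        · rw [if_neg (by omega : ¬ t < w), if_neg h2]
    have hstep : innerStepA P g p (mixV G t g p V, mixC G t g C, Num) t
        = (mixV G (t-1) g p V, mixC G (t-1) g C,
           Num + (if PySem.List.pyGetD V (t - g) 0 + p ≥ P then PySem.List.pyGetD C (t - g) 0 else 0)) := by
      unfold innerStepA
      simp only [hrV1, hrV2, hrC1, hrC2, hwV, hwC]
      by_cases hcond : PySem.List.pyGetD V (t - g) 0 + p ≥ P
      · rw [if_pos hcond, if_pos hcond]
      · rw [if_neg hcond, if_neg hcond]; ring_nf
    rw [hstep, ih (t-1) _ (by omega) (by omega)]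
    have hsplit : partialCnt P g p t V C
        = partialCnt P g p (t-1) V C + (if PySem.List.pyGetD V (t - g) 0 + p ≥ P then PySem.List.pyGetD C (t - g) 0 else 0) := by
      unfold partialCnt
      have h1 : t - g + 1 = (t - g) + 1 := by ring
      have h2 : t - 1 - g + 1 = t - g := by ring
      rw [h1, h2, PySem.List.pyRange_one_succ_right (by omega : (0:Int) ≤ t - g)]
      rw [List.map_append, List.sum_append]
      simp
    rw [hsplit]
    refine congrArg (fun z => (mixV G (g-1) g p V, mixC G (g-1) g C, z)) ?_
    ring

lemma itemStep_eq (G P : Int) (gp : Int × Int) (V C : List Int) (Num : Int)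
    (hG : 0 ≤ G) (hg : 0 ≤ gp.1)
    (hV : (V.length : Int) = G + 1) (hC : (C.length : Int) = G + 1) :
    itemStep G P (V, C, Num) gp
      = (nextLayerV G gp.1 gp.2 V, nextLayerC G gp.1 C, Num + cntB G P gp.1 gp.2 V C) := by
  obtain ⟨g, p⟩ := gp
  simp only at hg ⊢
  by_cases hgG : g ≤ G
  · unfold itemStep
    have h0 : G = g - 1 + ((G - (g-1)).toNat : Int) := by omega
    have := inner_go G P g p V C hG hg (G - (g-1)).toNat G Num h0 (le_refl G)
    rw [mixV_top G g p V hV, mixC_top G g C hC] at this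
    rw [this, mixV_bot, mixC_bot]
    rfl
  · unfold itemStep
    rw [PySem.List.pyRange_neg_one_eq_nil (by omega : G ≤ g - 1)]
    simp only [List.foldl_nil]
    have hnV : nextLayerV G g p V = V := by
      unfold nextLayerV
      rw [List.map_congr_left (g := fun w => PySem.List.pyGetD V w 0)]
      · rw [← hV]; exact PySem.List.map_pyGetD_pyRange_zero' V 0
      · intro w hw
        rw [PySem.List.mem_pyRange_one] at hw
        rw [if_neg (by omega : ¬ w ≥ g)]
    have hnC : nextLayerC G g C = C := by
      unfold nextLayerC
      rw [List.map_congr_left (g := fun w => PySem.List.pyGetD C w 0)]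
      · rw [← hC]; exact PySem.List.map_pyGetD_pyRange_zero' C 0
      · intro w hw
        rw [PySem.List.mem_pyRange_one] at hw
        rw [if_neg (by omega : ¬ w ≥ g)]
    have hcnt : cntB G P g p V C = 0 := by
      unfold cntB
      rw [PySem.List.pyRange_one_eq_nil (by omega : G - g + 1 ≤ 0)]
      simp
    rw [hnV, hnC, hcnt]
    ring_nf

lemma length_nextLayerV (G g p : Int) (V : List Int) (hG : 0 ≤ G) :
    ((nextLayerV G g p V).length : Int) = G + 1 := by
  unfold nextLayerV
  rw [List.length_map, PySem.List.length_pyRange_one]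
  omega

lemma length_nextLayerC (G g : Int) (C : List Int) (hG : 0 ≤ G) :
    ((nextLayerC G g C).length : Int) = G + 1 := by
  unfold nextLayerC
  rw [List.length_map, PySem.List.length_pyRange_one]
  omega

lemma chainA (G P : Int) (hG : 0 ≤ G) :
    ∀ (items : List (Int × Int)) (V C : List Int) (Num : Int),
      (∀ gp ∈ items, 0 ≤ gp.1) → (V.length : Int) = G + 1 → (C.length : Int) = G + 1 →
      (items.foldl (itemStep G P) (V, C, Num)).2.2 = Num + countAll G P items V C := by
  intro items
  induction items with
  | nil => intro V C Num _ _ _; simp [countAll]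
  | cons gp r ih =>
    intro V C Num hpos hV hC
    rw [List.foldl_cons, itemStep_eq G P gp V C Num hG (hpos gp (by simp)) hV hC]
    rw [ih _ _ _ (fun x hx => hpos x (by simp [hx])) (length_nextLayerV G gp.1 gp.2 V hG) (length_nextLayerC G gp.1 C hG)]
    rw [countAll_cons]
    ring

lemma conv (G P : Int) (group profit : List Int) :
    ∀ (m k : Nat) (init : List Int × List Int × Int), group.length - k = m → k ≤ group.length →
    (∀ j : Nat, j < group.length → group.getD j 0 ≤ G → j < profit.length) →
    (PySem.List.pyRange ((k:Int)+1) ((group.length:Int)+1) 1).foldl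
      (fun st i =>
        (PySem.List.pyRange G (PySem.List.pyGetD ((0:Int)::group) i 0 - 1) (-1)).foldl
          (innerStepA P (PySem.List.pyGetD ((0:Int)::group) i 0) (PySem.List.pyGetD ((0:Int)::profit) i 0)) st) init
      = ((group.drop k).zip (profit.drop k)).foldl (itemStep G P) init := by
  intro m
  induction m with
  | zero =>
    intro k init hm hk hpre
    have hkn : k = group.length := by omega
    subst hkn
    rw [PySem.List.pyRange_one_eq_nil (by omega), List.drop_length]
    simp
  | succ m ih =>
    intro k init hm hk hpre
    have hkn : k < group.length := by omega
    rw [PySem.List.pyRange_one_cons (by exact_mod_cast (by omega : (k:Int) + 1 < (group.length:Int) + 1))]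
    rw [List.foldl_cons]
    have hcast : (k:Int) + 1 = ((k+1 : Nat) : Int) := by push_cast; ring
    have hgetg : PySem.List.pyGetD ((0:Int)::group) ((k:Int)+1) 0 = group.getD k 0 := by
      rw [hcast, PySem.List.pyGetD_natCast]
      simp [List.getD_cons_succ]
    have hcast2 : (k:Int) + 1 + 1 = ((k+1 : Nat) : Int) + 1 := by push_cast; ring
    by_cases hkp : k < profit.length
    · have hgetp : PySem.List.pyGetD ((0:Int)::profit) ((k:Int)+1) 0 = profit.getD k 0 := by
        rw [hcast, PySem.List.pyGetD_natCast]
        simp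
      rw [hgetg, hgetp, hcast2, ih (k+1) _ (by omega) (by omega) hpre]
      rw [List.drop_eq_getElem_cons hkn, List.drop_eq_getElem_cons hkp]
      rw [List.zip_cons_cons, List.foldl_cons]
      rw [List.getD_eq_getElem group 0 hkn, List.getD_eq_getElem profit 0 hkp]
      rfl
    · have hgG : ¬ group.getD k 0 ≤ G := fun h => hkp (hpre k hkn h)
      rw [hgetg]
      rw [PySem.List.pyRange_neg_one_eq_nil (by omega : G ≤ group.getD k 0 - 1)]
      rw [List.foldl_nil, hcast2, ih (k+1) _ (by omega) (by omega) hpre]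
      have hd1 : profit.drop k = [] := List.drop_eq_nil_of_le (by omega)
      have hd2 : profit.drop (k+1) = [] := List.drop_eq_nil_of_le (by omega)
      rw [hd1, hd2, List.zip_nil_right, List.zip_nil_right]

lemma build_fst (G : Int) :
    ∀ (items : List (Int × Int)) (ls : List (List Int × List Int)) (V C : List Int),
    (items.foldl
      (fun (st : List (List Int × List Int) × List Int × List Int) gp =>
        (st.1 ++ [(st.2.1, st.2.2)], nextLayerV G gp.1 gp.2 st.2.1, nextLayerC G gp.1 st.2.2))
      (ls, V, C)).1 = ls ++ preLayers G items V C := by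
  intro items
  induction items with
  | nil => intro ls V C; simp [preLayers]
  | cons gp r ih =>
    intro ls V C
    rw [List.foldl_cons]
    simp only
    rw [ih (ls ++ [(V, C)]) _ _, preLayers_cons]
    simp

lemma countB (G P : Int) :
    ∀ (items : List (Int × Int)) (V C : List Int) (acc : Int),
    ((items.zip (preLayers G items V C)).foldl
      (fun acc x => acc + cntB G P x.1.1 x.1.2 x.2.1 x.2.2) acc) = acc + countAll G P items V C := by
  intro items
  induction items with
  | nil => intro V C acc; simp [preLayers, countAll]
  | cons gp r ih =>
    intro V C acc
    rw [preLayers_cons, List.zip_cons_cons, List.foldl_cons, ih, countAll_cons]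
    ring

lemma map_const_set (l : List Int) : (l.map (fun _ => (0:Int))).set 0 0 = l.map (fun _ => (0:Int)) := by
  cases l <;> simp

lemma initV_eq (G : Int) :
    PySem.List.pySetD ((PySem.List.pyRange 0 (G+1) 1).map (fun _ => (0:Int))) 0 0
      = (PySem.List.pyRange 0 (G+1) 1).map (fun _ => (0:Int)) := by
  rw [PySem.List.pySetD_of_nonneg _ _ (le_refl (0:Int))]
  exact map_const_set _

lemma initC_eq (G : Int) (hG : 0 ≤ G) :
    PySem.List.pySetD ((PySem.List.pyRange 0 (G+1) 1).map (fun _ => (0:Int))) 0 1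
      = 1 :: (PySem.List.pyRange 0 G 1).map (fun _ => (0:Int)) := by
  rw [PySem.List.pySetD_of_nonneg _ _ (le_refl (0:Int))]
  rw [PySem.List.pyRange_one_cons (by omega : (0:Int) < G + 1)]
  rw [List.map_cons]
  show ((0:Int) :: _).set 0 1 = _
  rw [List.set_cons_zero]
  congr 1
  rw [List.map_const', List.map_const']
  rw [PySem.List.length_pyRange_one, PySem.List.length_pyRange_one]
  congr 1
  omega

-- ===== VERDICT (by name: the statement is the Claim_ definition above) =====

theorem solve_2D_spec : Claim_equal_solve_2D := by
  intro G P group profit hdom hpre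
  obtain ⟨hG, hpre2⟩ := hpre
  show solve_2D G P group profit = solve_2D_alt G P group profit
  unfold solve_2D solve_2D_alt
  simp only [initV_eq G, initC_eq G hG]
  have hzip : ∀ gp ∈ group.zip profit, 0 ≤ gp.1 := by
    intro gp hgp
    obtain ⟨j, hj, hje⟩ := List.getElem_of_mem (List.of_mem_zip hgp).1
    have := (hpre2 j hj).1
    rw [List.getD_eq_getElem group 0 hj] at this
    exact hje ▸ this
  have hlenV : ((((PySem.List.pyRange 0 (G+1) 1).map (fun _ => (0:Int))).length : Int)) = G + 1 := by
    rw [List.length_map, PySem.List.length_pyRange_one]; omega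
  have hlenC : ((((1:Int) :: (PySem.List.pyRange 0 G 1).map (fun _ => (0:Int))).length : Int)) = G + 1 := by
    rw [List.length_cons, List.length_map, PySem.List.length_pyRange_one]; push_cast; omega
  have hc := conv G P group profit group.length 0 (((PySem.List.pyRange 0 (G+1) 1).map (fun _ => (0:Int))),
      ((1:Int) :: (PySem.List.pyRange 0 G 1).map (fun _ => (0:Int))), (0:Int))
      (by omega) (by omega) (fun j hj h => (hpre2 j hj).2 h)
  simp only [Nat.cast_zero, zero_add, List.drop_zero] at hc
  rw [hc]
  rw [chainA G P hG (group.zip profit) _ _ 0 hzip hlenV hlenC]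
  rw [build_fst G (group.zip profit) [] _ _, List.nil_append]
  rw [countB G P (group.zip profit) _ _ 0]
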